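-- pv_equiv track=rewrite | github.com/wcfcarolina13/Web3_Ecosystem_Processor | lib/import_engine.py | split_by_ecosystem
-- ===== SOURCE A (Python) =====
-- from typing import Dict, List, Optional, Tuple
--
-- def map_ecosystem_to_chain(
--     ecosystem: str, chains_config: List[Dict]
-- ) -> Optional[str]:
--     """
--     Map an ecosystem name to a chain ID from chains.json.
--
--     Tries: exact ID match, case-insensitive name match, containment.
--     Returns chain ID or None.
--     """
--     eco_lower = ecosystem.lower().strip()
--     if not eco_lower:
--         return None
--
--     for chain in chains_config:
--         chain_id = chain["id"].lower()
--         chain_name = chain["name"].lower()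
--
--         # Exact ID match
--         if eco_lower == chain_id:
--             return chain["id"]
--         # Exact name match
--         if eco_lower == chain_name:
--             return chain["id"]
--
--     # Containment: ecosystem contains chain name or vice versa
--     for chain in chains_config:
--         chain_name = chain["name"].lower()
--         if eco_lower in chain_name or chain_name in eco_lower:
--             return chain["id"]
--
--     return None
--
-- def split_by_ecosystem(
--     rows: List[Dict[str, str]],
--     chains_config: List[Dict],
-- ) -> Tuple[Dict[str, List[Dict[str, str]]], List[str]]:
--     """
--     Group rows by Chain column and map to known chain IDs.
--
--     Returns ({chain_id: rows}, unmatched_ecosystem_names).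
--     """
--     groups: Dict[str, List[Dict[str, str]]] = {}
--     unmatched: List[str] = []
--     seen_unmatched = set()
--
--     for row in rows:
--         eco = row.get("Ecosystem/Chain", "").strip()
--         chain_id = map_ecosystem_to_chain(eco, chains_config)
--
--         if chain_id:
--             row["Ecosystem/Chain"] = chain_id
--             groups.setdefault(chain_id, []).append(row)
--         else:
--             if eco and eco not in seen_unmatched:
--                 unmatched.append(eco)
--                 seen_unmatched.add(eco)
--             # Still group them under the raw ecosystem name
--             groups.setdefault(eco or "__unknown__", []).append(row)
--
--     return groups, unmatched
-- ===== SOURCE B (Python) =====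
-- from typing import Dict, List, Optional, Tuple
--
--
-- def _match_chain(eco_lower: str, chains_config: List[Dict]) -> Optional[str]:
--     """Single pass: return immediately on an exact id/name match; remember the
--     first containment match and fall back to it after the scan."""
--     containment = None
--     for chain in chains_config:
--         cid = chain["id"]
--         name_lower = chain["name"].lower()
--         if eco_lower == cid.lower() or eco_lower == name_lower:
--             return cid
--         if containment is None and (eco_lower in name_lower or name_lower in eco_lower):
--             containment = cid
--     return containment
--
--
-- def split_by_ecosystem(
--     rows: List[Dict[str, str]],
--     chains_config: List[Dict],
-- ) -> Tuple[Dict[str, List[Dict[str, str]]], List[str]]: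
--     # Pass 1: tag each row with its group key (mutating matched rows in place,
--     # as the original does) and collect unmatched ecosystem names.
--     tagged = []
--     unmatched: List[str] = []
--     seen = set()
--     for row in rows:
--         eco = row.get("Ecosystem/Chain", "").strip()
--         eco_lower = eco.lower().strip()
--         chain_id = None if not eco_lower else _match_chain(eco_lower, chains_config)
--         if chain_id:
--             row["Ecosystem/Chain"] = chain_id
--             key = chain_id
--         else:
--             if eco and eco not in seen:
--                 unmatched.append(eco)
--                 seen.add(eco)
--             key = eco or "__unknown__"
--         tagged.append((key, row))
--     # Pass 2: group the tagged rows.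
--     groups: Dict[str, List[Dict[str, str]]] = {}
--     for key, row in tagged:
--         groups.setdefault(key, []).append(row)
--     return groups, unmatched
-- ===== Notes on version B (the rewrite author's own statement) =====
-- stated objective: simpler
-- what changed: The two sequential matching loops (exact scan, then containment scan) are merged into one pass that returns on an exact hit and remembers the first containment hit as a fallback, and the grouping is restructured into tag-then-group: a first pass computes each row's group key (and the unmatched list), a second pass builds the groups dict from the tagged list.
import Mathlib
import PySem

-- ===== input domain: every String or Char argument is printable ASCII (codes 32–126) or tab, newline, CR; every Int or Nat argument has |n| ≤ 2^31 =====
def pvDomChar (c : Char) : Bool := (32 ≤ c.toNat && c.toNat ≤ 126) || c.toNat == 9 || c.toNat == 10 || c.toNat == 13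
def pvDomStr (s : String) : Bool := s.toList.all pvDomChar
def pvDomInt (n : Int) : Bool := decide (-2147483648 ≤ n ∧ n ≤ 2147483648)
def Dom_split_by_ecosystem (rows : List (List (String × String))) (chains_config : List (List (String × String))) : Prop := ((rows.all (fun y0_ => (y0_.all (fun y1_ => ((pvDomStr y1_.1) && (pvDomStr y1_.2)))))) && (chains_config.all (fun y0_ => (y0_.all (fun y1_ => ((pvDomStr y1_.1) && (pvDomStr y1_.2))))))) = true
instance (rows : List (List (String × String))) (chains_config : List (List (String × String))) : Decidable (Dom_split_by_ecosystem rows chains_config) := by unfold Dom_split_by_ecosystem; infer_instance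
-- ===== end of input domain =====

-- B merges A's two matching loops (exact scan, then containment scan) into one pass with a
-- containment fallback, and replaces A's interleaved grouping loop by tag-then-group (two passes).
-- Objective: simpler. Both A and B mutate matched rows in place in Python (the same mutation);
-- the equivalence proved here is about the return value.

-- shared helper: groups.setdefault(k, []).append(r)  (both Pythons contain this very line)
def pvSdApp (g : PySem.Dict String (List (List (String × String)))) (k : String)
    (r : List (String × String)) : PySem.Dict String (List (List (String × String))) :=
  g.insert k (g.getD k [] ++ [r])

-- shared helper: Python truthiness of chain_id ('if chain_id:')
def pvTruthy (o : Option String) : Option String :=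
  match o with
  | some c => if c = "" then none else some c
  | none => none

-- ===== PORT A =====
-- first loop of map_ecosystem_to_chain: exact id/name match; none = KeyError
def pvLoopExact (el : String) : List (List (String × String)) → Option (Option String)
  | [] => some none
  | c :: cs =>
    match (PySem.Dict.mk c).get? "id", (PySem.Dict.mk c).get? "name" with
    | some cid, some cn =>
      if el = PySem.Str.lower cid then some (some cid)
      else if el = PySem.Str.lower cn then some (some cid)
      else pvLoopExact el cs
    | _, _ => none

-- second loop: containment; none = KeyError
def pvLoopContain (el : String) : List (List (String × String)) → Option (Option String)
  | [] => some none
  | c :: cs =>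
    match (PySem.Dict.mk c).get? "name" with
    | some cn =>
      if PySem.Str.isIn el (PySem.Str.lower cn) || PySem.Str.isIn (PySem.Str.lower cn) el then
        match (PySem.Dict.mk c).get? "id" with
        | some cid => some (some cid)
        | none => none
      else pvLoopContain el cs
    | none => none

-- map_ecosystem_to_chain; outer 'none' = KeyError, inner Option = Python's Optional[str]
def pvMapEco (ecosystem : String) (chains : List (List (String × String))) : Option (Option String) :=
  let el := PySem.Str.strip (PySem.Str.lower ecosystem)
  if el = "" then some none
  else
    match pvLoopExact el chains with
    | none => none
    | some (some cid) => some (some cid)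
    | some none => pvLoopContain el chains

-- the main loop of A; none = KeyError propagated from map_ecosystem_to_chain
def pvGoA (chains : List (List (String × String))) :
    List (List (String × String)) → PySem.Dict String (List (List (String × String))) →
    List String → PySem.Set String →
    Option (PySem.Dict String (List (List (String × String))) × List String)
  | [], g, u, _ => some (g, u)
  | r :: rs, g, u, s =>
    let eco := PySem.Str.strip ((PySem.Dict.mk r).getD "Ecosystem/Chain" "")
    match pvMapEco eco chains with
    | none => none
    | some cidOpt =>
      match pvTruthy cidOpt with
      | some cid =>
        let r' := ((PySem.Dict.mk r).insert "Ecosystem/Chain" cid).items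
        pvGoA chains rs (pvSdApp g cid r') u s
      | none =>
        let u' := if eco ≠ "" ∧ eco ∉ s then u ++ [eco] else u
        let s' := if eco ≠ "" ∧ eco ∉ s then PySem.Set.add s eco else s
        pvGoA chains rs (pvSdApp g (if eco = "" then "__unknown__" else eco) r) u' s'

def split_by_ecosystem (rows : List (List (String × String))) (chains_config : List (List (String × String))) : (List (String × List (List (String × String)))) × List String :=
  match pvGoA chains_config rows PySem.Dict.empty [] PySem.Set.empty with
  | some (g, u) => (g.items, u)
  | none => ([], [])   -- unreachable under Pre_ (Python raises KeyError here)

-- ===== PORT B =====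
-- B's single matching pass: exact hit returns, first containment hit is remembered; none = KeyError
def pvMatchChain (el : String) (cont : Option String) :
    List (List (String × String)) → Option (Option String)
  | [] => some cont
  | c :: cs =>
    match (PySem.Dict.mk c).get? "id", (PySem.Dict.mk c).get? "name" with
    | some cid, some cn =>
      let nl := PySem.Str.lower cn
      if el = PySem.Str.lower cid ∨ el = nl then some (some cid)
      else
        pvMatchChain el
          (if cont = none ∧ (PySem.Str.isIn el nl ∨ PySem.Str.isIn nl el) then some cid else cont) cs
    | _, _ => none

-- B's pass 1: tag rows with their group key, collecting unmatched; none = KeyError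
def pvTagB (chains : List (List (String × String))) :
    List (List (String × String)) → List (String × List (String × String)) →
    List String → PySem.Set String →
    Option (List (String × List (String × String)) × List String)
  | [], acc, u, _ => some (acc, u)
  | r :: rs, acc, u, s =>
    let eco := PySem.Str.strip ((PySem.Dict.mk r).getD "Ecosystem/Chain" "")
    let el := PySem.Str.strip (PySem.Str.lower eco)
    match (if el = "" then some none else pvMatchChain el none chains) with
    | none => none
    | some cidOpt =>
      match pvTruthy cidOpt with
      | some cid =>
        pvTagB chains rs (acc ++ [(cid, ((PySem.Dict.mk r).insert "Ecosystem/Chain" cid).items)]) u s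
      | none =>
        let u' := if eco ≠ "" ∧ eco ∉ s then u ++ [eco] else u
        let s' := if eco ≠ "" ∧ eco ∉ s then PySem.Set.add s eco else s
        pvTagB chains rs (acc ++ [((if eco = "" then "__unknown__" else eco), r)]) u' s'

def split_by_ecosystem_alt (rows : List (List (String × String))) (chains_config : List (List (String × String))) : (List (String × List (List (String × String)))) × List String :=
  match pvTagB chains_config rows [] [] PySem.Set.empty with
  | some (tg, u) => ((tg.foldl (fun g kr => pvSdApp g kr.1 kr.2) PySem.Dict.empty).items, u)
  | none => ([], [])   -- unreachable under Pre_ (Python raises KeyError here)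

-- ===== PRECONDITION & SPEC =====
-- Pre_ excludes the inputs where Python raises KeyError: a chain dict lacking an "id" or "name"
-- key that is read while matching some row with a nonempty stripped ecosystem. It is slightly
-- narrower than A's exact raise set: when an exact match happens to occur before the malformed
-- chain is reached, A still returns (and B returns the same value); see the cite in claim.json.
def Pre_split_by_ecosystem (rows : List (List (String × String))) (chains_config : List (List (String × String))) : Prop :=
  (∃ r ∈ rows, PySem.Str.strip ((PySem.Dict.mk r).getD "Ecosystem/Chain" "") ≠ "") →
  ∀ c ∈ chains_config,
    (PySem.Dict.mk c).contains "id" = true ∧ (PySem.Dict.mk c).contains "name" = true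
instance (rows : List (List (String × String))) (chains_config : List (List (String × String))) : Decidable (Pre_split_by_ecosystem rows chains_config) := by unfold Pre_split_by_ecosystem; infer_instance

def pvWitness_split_by_ecosystem : (List (List (String × String))) × (List (List (String × String))) :=
  ([[("Ecosystem/Chain", "Eth")]], [[("id", "eth"), ("name", "Ethereum")]])

def Spec_split_by_ecosystem (rows : List (List (String × String))) (chains_config : List (List (String × String))) (out : (List (String × List (List (String × String)))) × List String) : Prop := out = split_by_ecosystem_alt rows chains_config
instance (rows : List (List (String × String))) (chains_config : List (List (String × String))) (out : (List (String × List (List (String × String)))) × List String) : Decidable (Spec_split_by_ecosystem rows chains_config out) := by unfold Spec_split_by_ecosystem; infer_instance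

-- ===== CLAIM (what is proved, stated in full; the proofs are below) =====
def Claim_equal_split_by_ecosystem : Prop := ∀ (rows : List (List (String × String))) (chains_config : List (List (String × String))), Dom_split_by_ecosystem rows chains_config → Pre_split_by_ecosystem rows chains_config → Spec_split_by_ecosystem rows chains_config (split_by_ecosystem rows chains_config)

-- ===== LEMMAS AND PROOFS =====

-- B's one-pass matcher equals A's two sequential loops (for any pending fallback `cont`).
theorem pvMatchChain_eq (el : String) (cs : List (List (String × String))) : ∀ cont,
    pvMatchChain el cont cs =
      match pvLoopExact el cs with
      | none => none
      | some (some cid) => some (some cid)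
      | some none =>
        match cont with
        | some c => some (some c)
        | none => pvLoopContain el cs := by
  induction cs with
  | nil => intro cont; cases cont <;> simp [pvMatchChain, pvLoopExact, pvLoopContain]
  | cons c cs ih =>
    intro cont
    simp only [pvMatchChain, pvLoopExact, pvLoopContain]
    cases hid : (PySem.Dict.mk c).get? "id" with
    | none => rfl
    | some cid =>
      cases hn : (PySem.Dict.mk c).get? "name" with
      | none => rfl
      | some cn =>
        dsimp only
        by_cases h1 : el = PySem.Str.lower cid
        · simp [h1]
        · by_cases h2 : el = PySem.Str.lower cn
          · simp [h2]
          · rw [if_neg (not_or.mpr ⟨h1, h2⟩), if_neg h1, if_neg h2, ih]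
            cases hE : pvLoopExact el cs with
            | none => rfl
            | some o =>
              cases o with
              | some w => cases cont <;> simp
              | none =>
                cases cont with
                | some c0 => simp
                | none =>
                  simp only [PySem.Str.isIn_eq, PySem.Str.toList_lower]
                  by_cases ha : PySem.Chars.isIn el.toList (PySem.Chars.lower cn.toList) = true <;>
                    by_cases hb : PySem.Chars.isIn (PySem.Chars.lower cn.toList) el.toList = true <;>
                      simp [ha, hb]

-- a longer accumulator in B's tagging pass is just prepended to the result
theorem pvTagB_acc (chains : List (List (String × String)))
    (rs : List (List (String × String))) : ∀ acc u s,
    pvTagB chains rs acc u s =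
      (pvTagB chains rs [] u s).map (fun p => (acc ++ p.1, p.2)) := by
  induction rs with
  | nil => intro acc u s; simp [pvTagB]
  | cons r rs ih =>
    intro acc u s
    simp only [pvTagB]
    cases hm : (if PySem.Str.strip (PySem.Str.lower
        (PySem.Str.strip ((PySem.Dict.mk r).getD "Ecosystem/Chain" ""))) = ""
        then some none
        else pvMatchChain (PySem.Str.strip (PySem.Str.lower
          (PySem.Str.strip ((PySem.Dict.mk r).getD "Ecosystem/Chain" "")))) none chains) with
    | none => rfl
    | some cidOpt =>
      cases ht : pvTruthy cidOpt with
      | some cid =>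
        simp only [ht]
        conv_rhs => rw [ih]
        rw [ih]
        cases pvTagB chains rs [] u s <;> simp
      | none =>
        simp only [ht]
        conv_rhs => rw [ih]
        rw [ih]
        generalize pvTagB chains rs []
            (if ¬PySem.Str.strip ((PySem.Dict.mk r).getD "Ecosystem/Chain" "") = "" ∧
                PySem.Str.strip ((PySem.Dict.mk r).getD "Ecosystem/Chain" "") ∉ s then
              u ++ [PySem.Str.strip ((PySem.Dict.mk r).getD "Ecosystem/Chain" "")]
            else u)
            (if ¬PySem.Str.strip ((PySem.Dict.mk r).getD "Ecosystem/Chain" "") = "" ∧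
                PySem.Str.strip ((PySem.Dict.mk r).getD "Ecosystem/Chain" "") ∉ s then
              PySem.Set.add s (PySem.Str.strip ((PySem.Dict.mk r).getD "Ecosystem/Chain" ""))
            else s) = t
        cases t <;> simp

-- A's interleaved grouping loop equals B's tag-then-group, relative to any partial groups dict
theorem pvGoA_eq_tag (chains : List (List (String × String)))
    (rs : List (List (String × String))) : ∀ g u s,
    pvGoA chains rs g u s =
      match pvTagB chains rs [] u s with
      | none => none
      | some (tg, u') => some (tg.foldl (fun g2 kr => pvSdApp g2 kr.1 kr.2) g, u') := by
  induction rs with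
  | nil => intro g u s; simp [pvGoA, pvTagB]
  | cons r rs ih =>
    intro g u s
    simp only [pvGoA, pvTagB]
    have hmap : pvMapEco (PySem.Str.strip ((PySem.Dict.mk r).getD "Ecosystem/Chain" "")) chains =
        (if PySem.Str.strip (PySem.Str.lower
            (PySem.Str.strip ((PySem.Dict.mk r).getD "Ecosystem/Chain" ""))) = ""
          then some none
          else pvMatchChain (PySem.Str.strip (PySem.Str.lower
            (PySem.Str.strip ((PySem.Dict.mk r).getD "Ecosystem/Chain" "")))) none chains) := by
      simp only [pvMapEco, pvMatchChain_eq]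
    rw [hmap]
    cases hm : (if PySem.Str.strip (PySem.Str.lower
        (PySem.Str.strip ((PySem.Dict.mk r).getD "Ecosystem/Chain" ""))) = ""
        then some none
        else pvMatchChain (PySem.Str.strip (PySem.Str.lower
          (PySem.Str.strip ((PySem.Dict.mk r).getD "Ecosystem/Chain" "")))) none chains) with
    | none => rfl
    | some cidOpt =>
      cases ht : pvTruthy cidOpt with
      | some cid =>
        simp only [ht]
        conv_rhs => rw [pvTagB_acc]
        rw [ih]
        cases pvTagB chains rs [] u s <;> simp
      | none =>
        simp only [ht]
        conv_rhs => rw [pvTagB_acc]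
        rw [ih]
        generalize pvTagB chains rs []
            (if ¬PySem.Str.strip ((PySem.Dict.mk r).getD "Ecosystem/Chain" "") = "" ∧
                PySem.Str.strip ((PySem.Dict.mk r).getD "Ecosystem/Chain" "") ∉ s then
              u ++ [PySem.Str.strip ((PySem.Dict.mk r).getD "Ecosystem/Chain" "")]
            else u)
            (if ¬PySem.Str.strip ((PySem.Dict.mk r).getD "Ecosystem/Chain" "") = "" ∧
                PySem.Str.strip ((PySem.Dict.mk r).getD "Ecosystem/Chain" "") ∉ s then
              PySem.Set.add s (PySem.Str.strip ((PySem.Dict.mk r).getD "Ecosystem/Chain" ""))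
            else s) = t
        cases t <;> simp

-- ===== VERDICT (by name: the statement is the Claim_ definition above) =====
theorem split_by_ecosystem_spec : Claim_equal_split_by_ecosystem := by
  intro rows chains _ _
  unfold Spec_split_by_ecosystem split_by_ecosystem split_by_ecosystem_alt
  rw [pvGoA_eq_tag]
  cases pvTagB chains rows [] [] PySem.Set.empty <;> simp
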